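-- pv_equiv track=rewrite | github.com/rdartus/home-ops | scripts/flux-graph.py | render_simple
-- ===== SOURCE A (Python) =====
-- FLUX_CONTROLLER_ID = "flux_controller"
--
-- FLUX_CONTROLLER_LABEL = "Flux Controller"
--
-- def transitive_reduction(edges: list[tuple[str, str]]) -> list[tuple[str, str]]:
--     """
--     Remove redundant edges from a DAG.
--     Edge (u, v) is redundant when v is reachable from u via a longer path,
--     i.e. through at least one intermediate node.
--     """
--     # Build adjacency list (full reachability per node, excluding direct edge)
--     adj: dict[str, set[str]] = {}
--     for u, v in edges:
--         adj.setdefault(u, set()).add(v)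
--         adj.setdefault(v, set())  # ensure every node exists
--
--     def reachable_via_others(u: str, v: str) -> bool:
--         """True if v is reachable from u through any successor of u other than v."""
--         visited: set[str] = set()
--         stack = [w for w in adj.get(u, set()) if w != v]
--         while stack:
--             node = stack.pop()
--             if node == v:
--                 return True
--             if node not in visited:
--                 visited.add(node)
--                 stack.extend(adj.get(node, set()))
--         return False
--
--     return [(u, v) for u, v in edges if not reachable_via_others(u, v)]
--
-- def render_simple(
--     nodes: dict[str, str],
--     edges: list[tuple[str, str]],
--     has_deps: set[str],
-- ) -> str:
--     """
--     Simple mode: flat graph, transitive reduction, virtual Flux Controller root.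
--     """
--     reduced = transitive_reduction(edges)
--     root_ids = [nid for nid in sorted(nodes) if nid not in has_deps]
--
--     lines = ["graph TD;"]
--     lines.append("")
--     lines.append(f'  {FLUX_CONTROLLER_ID}["{FLUX_CONTROLLER_LABEL}"]')
--     lines.append("")
--
--     for nid, label in sorted(nodes.items(), key=lambda x: x[1]):
--         lines.append(f'  {nid}["{label}"]')
--
--     lines.append("")
--     for nid in root_ids:
--         lines.append(f"  {FLUX_CONTROLLER_ID} --> {nid}")
--
--     lines.append("")
--     for prereq, dependent in sorted(reduced):
--         lines.append(f"  {prereq} --> {dependent}")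
--
--     return "\n".join(lines)
-- ===== SOURCE B (Python) =====
-- FLUX_CONTROLLER_ID = "flux_controller"
--
-- FLUX_CONTROLLER_LABEL = "Flux Controller"
--
--
-- def _reach_from(succ: dict[str, set[str]], x: str) -> set[str]:
--     """All nodes reachable from x (including x itself), one DFS."""
--     seen: set[str] = set()
--     stack = [x]
--     while stack:
--         n = stack.pop()
--         if n not in seen:
--             seen.add(n)
--             stack.extend(succ.get(n, ()))
--     return seen
--
--
-- def render_simple(
--     nodes: dict[str, str],
--     edges: list[tuple[str, str]],
--     has_deps: set[str],
-- ) -> str: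
--     """
--     Simple mode: flat graph, transitive reduction, virtual Flux Controller root.
--     Reduction: memoize the reachable set of every node once, then an edge
--     (u, v) is redundant iff v lies in the reachable set of another successor
--     of u.
--     """
--     succ: dict[str, set[str]] = {}
--     for u, v in edges:
--         succ.setdefault(u, set()).add(v)
--         succ.setdefault(v, set())
--
--     reach = {x: _reach_from(succ, x) for x in succ}
--
--     reduced = [
--         (u, v)
--         for u, v in edges
--         if not any(w != v and v in reach[w] for w in succ[u])
--     ]
--
--     node_lines = [
--         f'  {nid}["{label}"]'
--         for nid, label in sorted(nodes.items(), key=lambda x: x[1])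
--     ]
--     root_lines = [
--         f"  {FLUX_CONTROLLER_ID} --> {nid}"
--         for nid in sorted(nodes)
--         if nid not in has_deps
--     ]
--     edge_lines = [f"  {p} --> {d}" for p, d in sorted(reduced)]
--
--     return "\n".join(
--         ["graph TD;", "", f'  {FLUX_CONTROLLER_ID}["{FLUX_CONTROLLER_LABEL}"]', ""]
--         + node_lines
--         + [""]
--         + root_lines
--         + [""]
--         + edge_lines
--     )
-- ===== Notes on version B (the rewrite author's own statement) =====
-- stated objective: alternative
-- what changed: Instead of running a fresh per-edge DFS (reachable_via_others) for every edge, B memoizes one reachable set per node with a single DFS each and decides each edge's redundancy by set-membership lookups against the successors' memoized sets; rendering is built from comprehensions joined once instead of an append-accumulated lines list.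
import Mathlib
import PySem

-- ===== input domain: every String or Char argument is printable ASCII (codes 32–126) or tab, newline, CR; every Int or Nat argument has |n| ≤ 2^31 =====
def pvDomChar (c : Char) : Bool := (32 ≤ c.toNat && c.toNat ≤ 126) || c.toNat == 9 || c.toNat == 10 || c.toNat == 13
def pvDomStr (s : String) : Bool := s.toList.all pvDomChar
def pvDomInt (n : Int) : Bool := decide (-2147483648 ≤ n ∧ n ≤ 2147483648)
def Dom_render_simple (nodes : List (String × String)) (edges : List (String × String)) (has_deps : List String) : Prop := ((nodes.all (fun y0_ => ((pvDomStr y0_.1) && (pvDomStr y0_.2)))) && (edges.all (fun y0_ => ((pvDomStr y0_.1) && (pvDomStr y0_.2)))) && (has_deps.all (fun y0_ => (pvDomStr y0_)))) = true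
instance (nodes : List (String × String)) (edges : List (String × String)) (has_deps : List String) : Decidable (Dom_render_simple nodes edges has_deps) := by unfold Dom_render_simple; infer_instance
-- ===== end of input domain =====

-- B replaces A's per-edge DFS by one memoized reachable set per node, checking each edge against the successors' memoized sets (objective: alternative).

def pvFluxId : String := "flux_controller"
def pvFluxLabel : String := "Flux Controller"

-- Fuel bound for the DFS loops: every iteration pops one stack entry and can push the
-- successors of an unvisited node at most once, so (stack length + Σ over unvisited
-- nodes of (1 + out-degree)) bounds the number of iterations.  Used by both ports only
-- to make the Python 'while stack:' loops total; it never changes their value.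
def pvDfsBound (adj : PySem.Dict String (PySem.Set String)) (visited : PySem.Set String) : Nat :=
  ((adj.keys.filter (fun u => decide (u ∉ visited))).map (fun u => 1 + (adj.getD u []).length)).sum

-- ===== PORT A =====

-- adj construction: 'adj.setdefault(u, set()).add(v); adj.setdefault(v, set())'
def pvBuildAdjA (edges : List (String × String)) : PySem.Dict String (PySem.Set String) :=
  edges.foldl
    (fun d e => ((d.modify e.1 [] (fun s => PySem.Set.add s e.2)).setdefault e.2 []))
    PySem.Dict.empty

-- the 'while stack:' loop of reachable_via_others; Lean list head = Python stack top
-- ('stack.pop()' pops the end), so 'stack.extend(S)' prepends S.reverse.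
def pvDfsFindA (adj : PySem.Dict String (PySem.Set String)) (v : String) :
    Nat → List String → PySem.Set String → Bool
  | 0, _, _ => false
  | _ + 1, [], _ => false
  | fuel + 1, node :: rest, visited =>
    if node = v then true
    else if node ∈ visited then pvDfsFindA adj v fuel rest visited
    else pvDfsFindA adj v fuel ((adj.getD node []).reverse ++ rest) (PySem.Set.add visited node)

def pvReachableViaOthersA (adj : PySem.Dict String (PySem.Set String)) (u v : String) : Bool :=
  let stack := (adj.getD u []).filter (fun w => w != v)
  pvDfsFindA adj v (stack.length + pvDfsBound adj [] + 1) stack []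

def pvTransitiveReductionA (edges : List (String × String)) : List (String × String) :=
  let adj := pvBuildAdjA edges
  edges.filter (fun e => !(pvReachableViaOthersA adj e.1 e.2))

def render_simple (nodes : List (String × String)) (edges : List (String × String)) (has_deps : List String) : String :=
  let d := PySem.Dict.ofList nodes
  let reduced := pvTransitiveReductionA edges
  let root_ids := (PySem.List.sorted d.keys (fun x => x) false).filter (fun nid => !(has_deps.contains nid))
  let lines := ["graph TD;"]
  let lines := lines ++ [""]
  let lines := lines ++ ["  " ++ pvFluxId ++ "[\"" ++ pvFluxLabel ++ "\"]"]
  let lines := lines ++ [""]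
  let lines := (PySem.List.sorted d.items (fun p => p.2) false).foldl
    (fun acc p => acc ++ ["  " ++ p.1 ++ "[\"" ++ p.2 ++ "\"]"]) lines
  let lines := lines ++ [""]
  let lines := root_ids.foldl (fun acc nid => acc ++ ["  " ++ pvFluxId ++ " --> " ++ nid]) lines
  let lines := lines ++ [""]
  let lines := (PySem.List.sorted2 reduced (fun p => p.1) (fun p => p.2) false).foldl
    (fun acc p => acc ++ ["  " ++ p.1 ++ " --> " ++ p.2]) lines
  PySem.Str.join "\n" lines

-- ===== PORT B =====

-- same adjacency loop as A's Python (B's Python keeps it verbatim)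
def pvBuildSuccB (edges : List (String × String)) : PySem.Dict String (PySem.Set String) :=
  edges.foldl
    (fun d e => ((d.modify e.1 [] (fun s => PySem.Set.add s e.2)).setdefault e.2 []))
    PySem.Dict.empty

-- the 'while stack:' loop of _reach_from, collecting 'seen'; same stack convention as above
def pvDfsCollectB (succ : PySem.Dict String (PySem.Set String)) :
    Nat → List String → PySem.Set String → PySem.Set String
  | 0, _, seen => seen
  | _ + 1, [], seen => seen
  | fuel + 1, n :: rest, seen =>
    if n ∈ seen then pvDfsCollectB succ fuel rest seen
    else pvDfsCollectB succ fuel ((succ.getD n []).reverse ++ rest) (PySem.Set.add seen n)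

def pvReachFromB (succ : PySem.Dict String (PySem.Set String)) (x : String) : PySem.Set String :=
  pvDfsCollectB succ (1 + pvDfsBound succ []) [x] []

-- 'reach = {x: _reach_from(succ, x) for x in succ}'
def pvReachDictB (succ : PySem.Dict String (PySem.Set String)) : PySem.Dict String (PySem.Set String) :=
  succ.keys.foldl (fun d x => d.insert x (pvReachFromB succ x)) PySem.Dict.empty

def render_simple_alt (nodes : List (String × String)) (edges : List (String × String)) (has_deps : List String) : String :=
  let d := PySem.Dict.ofList nodes
  let succ := pvBuildSuccB edges
  let reach := pvReachDictB succ
  -- 'reach[w]': w is always a key of succ (every edge endpoint is inserted), so the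
  -- total lookup 'getD w []' is exact here.
  let reduced := edges.filter
    (fun e => !((succ.getD e.1 []).any (fun w => w != e.2 && (reach.getD w []).contains e.2)))
  let node_lines := (PySem.List.sorted d.items (fun p => p.2) false).map
    (fun p => "  " ++ p.1 ++ "[\"" ++ p.2 ++ "\"]")
  let root_lines := ((PySem.List.sorted d.keys (fun x => x) false).filter
    (fun nid => !(has_deps.contains nid))).map (fun nid => "  " ++ pvFluxId ++ " --> " ++ nid)
  let edge_lines := (PySem.List.sorted2 reduced (fun p => p.1) (fun p => p.2) false).map
    (fun p => "  " ++ p.1 ++ " --> " ++ p.2)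
  PySem.Str.join "\n"
    ((["graph TD;", "", "  " ++ pvFluxId ++ "[\"" ++ pvFluxLabel ++ "\"]", ""]
      ++ node_lines ++ [""] ++ root_lines ++ [""] ++ edge_lines))

-- ===== PRECONDITION & SPEC =====
def Spec_render_simple (nodes : List (String × String)) (edges : List (String × String)) (has_deps : List String) (out : String) : Prop := out = render_simple_alt nodes edges has_deps
instance (nodes : List (String × String)) (edges : List (String × String)) (has_deps : List String) (out : String) : Decidable (Spec_render_simple nodes edges has_deps out) := by unfold Spec_render_simple; infer_instance

-- ===== CLAIM (what is proved, stated in full; the proofs are below) =====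
def Claim_equal_render_simple : Prop := ∀ (nodes : List (String × String)) (edges : List (String × String)) (has_deps : List String), Dom_render_simple nodes edges has_deps → Spec_render_simple nodes edges has_deps (render_simple nodes edges has_deps)

-- ===== LEMMAS AND PROOFS =====

-- v is reachable from w by a path all of whose nodes except possibly the last lie
-- outside 'visited' (exactly what either DFS loop can still discover).
inductive pvAReach (adj : PySem.Dict String (PySem.Set String)) (visited : PySem.Set String) :
    String → String → Prop
  | refl (v : String) : pvAReach adj visited v v
  | step {w s v : String} : w ∉ visited → s ∈ adj.getD w [] →
      pvAReach adj visited s v → pvAReach adj visited w v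

theorem pvAReach_mono {adj : PySem.Dict String (PySem.Set String)} {vis : PySem.Set String}
    {n w v : String} (h : pvAReach adj (PySem.Set.add vis n) w v) : pvAReach adj vis w v := by
  induction h with
  | refl => exact pvAReach.refl _
  | step hw hs _ ih =>
    exact pvAReach.step (fun hm => hw ((PySem.Set.mem_add _ _ _).mpr (Or.inl hm))) hs ih

theorem pvAReach_decomp {adj : PySem.Dict String (PySem.Set String)} {vis : PySem.Set String}
    {n w v : String} (hnv : n ≠ v) (h : pvAReach adj vis w v) :
    pvAReach adj (PySem.Set.add vis n) w v ∨
      ∃ s ∈ adj.getD n [], pvAReach adj (PySem.Set.add vis n) s v := by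
  induction h with
  | refl => exact Or.inl (pvAReach.refl _)
  | @step w s v hw hs _ ih =>
    rcases ih hnv with ih | ih
    · by_cases hwn : w = n
      · exact Or.inr ⟨s, hwn ▸ hs, ih⟩
      · refine Or.inl (pvAReach.step ?_ hs ih)
        intro hm
        rcases (PySem.Set.mem_add _ _ _).mp hm with h1 | h1
        · exact hw h1
        · exact hwn h1
    · exact Or.inr ih

-- no derivation can start at a visited node other than the target
theorem pvAReach_of_mem {adj : PySem.Dict String (PySem.Set String)} {vis : PySem.Set String}
    {w v : String} (h : pvAReach adj vis w v) (hw : w ∈ vis) : w = v := by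
  cases h with
  | refl => rfl
  | step h1 _ _ => exact absurd hw h1

theorem pvSumFilterAux (f : String → Nat) (p : String → Bool) (node : String) :
    ∀ l : List String, l.Nodup →
    ((l.filter (fun u => p u && !decide (u = node))).map f).sum
      + (if node ∈ l ∧ p node = true then f node else 0)
      = ((l.filter p).map f).sum := by
  intro l
  induction l with
  | nil => simp
  | cons a tl ih =>
    intro hnd
    rcases List.nodup_cons.mp hnd with ⟨hat, htl⟩
    have htl' := ih htl
    by_cases han : a = node
    · subst han
      have hnotin : ¬ (a ∈ tl ∧ p a = true) := fun h => hat h.1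
      simp only [hnotin, if_false, Nat.add_zero] at htl'
      by_cases hpa : p a = true
      · simp [hpa, htl', hat]
        omega
      · simp [hpa]
        exact htl'
    · have hmem : (node ∈ a :: tl ∧ p node = true) ↔ (node ∈ tl ∧ p node = true) := by
        constructor
        · rintro ⟨h1, h2⟩
          rcases List.mem_cons.mp h1 with h | h
          · exact absurd h.symm han
          · exact ⟨h, h2⟩
        · rintro ⟨h1, h2⟩
          exact ⟨List.mem_cons_of_mem _ h1, h2⟩
      rw [if_congr hmem rfl rfl]
      by_cases hpa : p a = true
      · simp [hpa, han, ← htl']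
        omega
      · simp [hpa, han]
        exact htl'

theorem pvDfsBound_decrease (adj : PySem.Dict String (PySem.Set String))
    (hnd : adj.keys.Nodup) (vis : PySem.Set String) (node : String) (hnv : node ∉ vis) :
    pvDfsBound adj (PySem.Set.add vis node) + (adj.getD node []).length ≤ pvDfsBound adj vis := by
  unfold pvDfsBound
  have hfilt : adj.keys.filter (fun u => decide (u ∉ PySem.Set.add vis node))
      = adj.keys.filter (fun u => (decide (u ∉ vis)) && !decide (u = node)) := by
    apply List.filter_congr
    intro u _
    simp [PySem.Set.mem_add vis node u, not_or]
  rw [hfilt]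
  have h := pvSumFilterAux (fun u => 1 + (adj.getD u []).length) (fun u => decide (u ∉ vis))
    node adj.keys hnd
  by_cases hk : node ∈ adj.keys
  · rw [if_pos ⟨hk, by simpa using hnv⟩] at h
    simp only [Nat.add_comm] at h
    omega
  · have hz : adj.getD node [] = [] := by
      apply PySem.Dict.getD_of_not_contains
      simp [PySem.Dict.contains_eq_decide_mem_keys, hk]
    rw [if_neg (fun hc => hk hc.1)] at h
    rw [hz]
    simpa using Nat.le_of_eq h

theorem pvDfsFindA_correct (adj : PySem.Dict String (PySem.Set String))
    (hnd : adj.keys.Nodup) (v : String) :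
    ∀ (fuel : Nat) (stack : List String) (visited : PySem.Set String),
      stack.length + pvDfsBound adj visited ≤ fuel →
      (pvDfsFindA adj v fuel stack visited = true ↔ ∃ w ∈ stack, pvAReach adj visited w v) := by
  intro fuel
  induction fuel with
  | zero =>
    intro stack visited hle
    cases stack with
    | nil => simp [pvDfsFindA]
    | cons node rest => simp [List.length_cons] at hle
  | succ fuel ih =>
    intro stack visited hle
    cases stack with
    | nil => simp [pvDfsFindA]
    | cons node rest =>
      by_cases hv : node = v
      · subst hv
        simp only [pvDfsFindA]
        constructor
        · intro _; exact ⟨node, by simp, pvAReach.refl node⟩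
        · intro _; rfl
      · by_cases hvis : node ∈ visited
        · rw [show pvDfsFindA adj v (fuel+1) (node::rest) visited
              = pvDfsFindA adj v fuel rest visited from by simp [pvDfsFindA, hv, hvis]]
          rw [ih rest visited (by simp [List.length_cons] at hle ⊢; omega)]
          constructor
          · rintro ⟨w, hw, hr⟩; exact ⟨w, List.mem_cons_of_mem _ hw, hr⟩
          · rintro ⟨w, hw, hr⟩
            rcases List.mem_cons.mp hw with h | h
            · subst h; exact absurd (pvAReach_of_mem hr hvis) hv
            · exact ⟨w, h, hr⟩
        · rw [show pvDfsFindA adj v (fuel+1) (node::rest) visited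
              = pvDfsFindA adj v fuel ((adj.getD node []).reverse ++ rest)
                  (PySem.Set.add visited node) from by simp [pvDfsFindA, hv, hvis]]
          have hb := pvDfsBound_decrease adj hnd visited node hvis
          rw [ih _ _ (by simp [List.length_append, List.length_reverse, List.length_cons] at hle ⊢; omega)]
          constructor
          · rintro ⟨w, hw, hr⟩
            rcases List.mem_append.mp hw with h | h
            · exact ⟨node, by simp,
                pvAReach.step hvis (List.mem_reverse.mp h) (pvAReach_mono hr)⟩
            · exact ⟨w, List.mem_cons_of_mem _ h, pvAReach_mono hr⟩
          · rintro ⟨w, hw, hr⟩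
            rcases pvAReach_decomp hv hr with hd | ⟨s, hs, hd⟩
            · rcases List.mem_cons.mp hw with h | h
              · subst h
                have hm : w ∈ PySem.Set.add visited w :=
                  (PySem.Set.mem_add _ _ _).mpr (Or.inr rfl)
                exact absurd (pvAReach_of_mem hd hm) hv
              · exact ⟨w, List.mem_append.mpr (Or.inr h), hd⟩
            · exact ⟨s, List.mem_append.mpr (Or.inl (List.mem_reverse.mpr hs)), hd⟩

theorem pvDfsCollectB_correct (adj : PySem.Dict String (PySem.Set String))
    (hnd : adj.keys.Nodup) :
    ∀ (fuel : Nat) (stack : List String) (seen : PySem.Set String),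
      stack.length + pvDfsBound adj seen ≤ fuel →
      ∀ y, (y ∈ pvDfsCollectB adj fuel stack seen ↔
        y ∈ seen ∨ ∃ w ∈ stack, pvAReach adj seen w y) := by
  intro fuel
  induction fuel with
  | zero =>
    intro stack seen hle y
    cases stack with
    | nil => simp [pvDfsCollectB]
    | cons n rest => simp [List.length_cons] at hle
  | succ fuel ih =>
    intro stack seen hle y
    cases stack with
    | nil => simp [pvDfsCollectB]
    | cons n rest =>
      by_cases hvis : n ∈ seen
      · rw [show pvDfsCollectB adj (fuel+1) (n::rest) seen
            = pvDfsCollectB adj fuel rest seen from by simp [pvDfsCollectB, hvis]]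
        rw [ih rest seen (by simp [List.length_cons] at hle ⊢; omega) y]
        constructor
        · rintro (h | ⟨w, hw, hr⟩)
          · exact Or.inl h
          · exact Or.inr ⟨w, List.mem_cons_of_mem _ hw, hr⟩
        · rintro (h | ⟨w, hw, hr⟩)
          · exact Or.inl h
          · rcases List.mem_cons.mp hw with h' | h'
            · subst h'; exact Or.inl ((pvAReach_of_mem hr hvis) ▸ hvis)
            · exact Or.inr ⟨w, h', hr⟩
      · rw [show pvDfsCollectB adj (fuel+1) (n::rest) seen
            = pvDfsCollectB adj fuel ((adj.getD n []).reverse ++ rest)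
                (PySem.Set.add seen n) from by simp [pvDfsCollectB, hvis]]
        have hb := pvDfsBound_decrease adj hnd seen n hvis
        rw [ih _ _ (by simp [List.length_append, List.length_reverse, List.length_cons] at hle ⊢; omega) y]
        constructor
        · rintro (h | ⟨w, hw, hr⟩)
          · rcases (PySem.Set.mem_add _ _ _).mp h with h' | h'
            · exact Or.inl h'
            · exact Or.inr ⟨n, by simp, h' ▸ pvAReach.refl y⟩
          · rcases List.mem_append.mp hw with h' | h'
            · exact Or.inr ⟨n, by simp,
                pvAReach.step hvis (List.mem_reverse.mp h') (pvAReach_mono hr)⟩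
            · exact Or.inr ⟨w, List.mem_cons_of_mem _ h', pvAReach_mono hr⟩
        · rintro (h | ⟨w, hw, hr⟩)
          · exact Or.inl ((PySem.Set.mem_add _ _ _).mpr (Or.inl h))
          · by_cases hny : n = y
            · exact Or.inl ((PySem.Set.mem_add _ _ _).mpr (Or.inr hny.symm))
            · rcases pvAReach_decomp hny hr with hd | ⟨s, hs, hd⟩
              · rcases List.mem_cons.mp hw with h' | h'
                · subst h'
                  have hm : w ∈ PySem.Set.add seen w :=
                    (PySem.Set.mem_add _ _ _).mpr (Or.inr rfl)
                  exact absurd (pvAReach_of_mem hd hm) hny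
                · exact Or.inr ⟨w, List.mem_append.mpr (Or.inr h'), hd⟩
              · exact Or.inr ⟨s, List.mem_append.mpr (Or.inl (List.mem_reverse.mpr hs)), hd⟩

-- invariant of the adjacency dict: nodup keys and every successor is a key
theorem pvBuildAdj_aux :
    ∀ (es : List (String × String)) (d : PySem.Dict String (PySem.Set String)),
      d.keys.Nodup → (∀ u w, w ∈ d.getD u [] → w ∈ d.keys) →
      (es.foldl (fun d e => ((d.modify e.1 [] (fun s => PySem.Set.add s e.2)).setdefault e.2 []))
          d).keys.Nodup ∧
        ∀ u w, w ∈ (es.foldl (fun d e =>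
            ((d.modify e.1 [] (fun s => PySem.Set.add s e.2)).setdefault e.2 [])) d).getD u [] →
          w ∈ (es.foldl (fun d e =>
            ((d.modify e.1 [] (fun s => PySem.Set.add s e.2)).setdefault e.2 [])) d).keys := by
  intro es
  induction es with
  | nil => intro d h1 h2; exact ⟨h1, h2⟩
  | cons e tl ih =>
    intro d hnd hval
    set d' := ((d.modify e.1 [] (fun s => PySem.Set.add s e.2)).setdefault e.2 []) with hd'
    have hmemk : ∀ x, x ∈ d'.keys ↔ x = e.2 ∨ x = e.1 ∨ x ∈ d.keys := by
      intro x
      rw [← PySem.Dict.contains_iff_mem_keys, hd', PySem.Dict.contains_setdefault,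
        PySem.Dict.contains_modify, ← PySem.Dict.contains_iff_mem_keys]
      simp [Bool.or_eq_true]
    have hget : ∀ u, d'.getD u [] =
        if u = e.1 then PySem.Set.add (d.getD e.1 []) e.2 else d.getD u [] := by
      intro u
      by_cases hub : u = e.2
      · subst hub
        rw [hd', PySem.Dict.getD_setdefault_self, PySem.Dict.getD_modify]
      · rw [hd', PySem.Dict.getD_eq_get?_getD, PySem.Dict.get?_setdefault_of_ne _ _ hub,
          ← PySem.Dict.getD_eq_get?_getD, PySem.Dict.getD_modify]
    have hnd' : d'.keys.Nodup := by
      have h1 : ((d.modify e.1 [] (fun s => PySem.Set.add s e.2))).keys.Nodup := by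
        rw [PySem.Dict.keys_modify]
        exact PySem.Dict.nodup_keys_insert _ _ _ hnd
      rw [hd', PySem.Dict.keys_setdefault]
      split_ifs with hc
      · exact h1
      · refine List.Nodup.append h1 (List.nodup_singleton _) ?_
        intro x hx hxs
        rw [List.mem_singleton] at hxs
        subst hxs
        rw [PySem.Dict.contains_iff_mem_keys] at hc
        exact hc hx
    have hval' : ∀ u w, w ∈ d'.getD u [] → w ∈ d'.keys := by
      intro u w hw
      rw [hget u] at hw
      rw [hmemk]
      split_ifs at hw with hu
      · rcases (PySem.Set.mem_add _ _ _).mp hw with h | h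
        · exact Or.inr (Or.inr (hval _ _ h))
        · exact Or.inl h
      · exact Or.inr (Or.inr (hval _ _ hw))
    simpa [List.foldl_cons] using ih d' hnd' hval'

theorem pvBuildAdj_inv (edges : List (String × String)) :
    (pvBuildAdjA edges).keys.Nodup ∧
      ∀ u w, w ∈ (pvBuildAdjA edges).getD u [] → w ∈ (pvBuildAdjA edges).keys := by
  refine pvBuildAdj_aux edges PySem.Dict.empty PySem.Dict.nodup_keys_empty ?_
  intro u w hw
  rw [show (PySem.Dict.empty.getD u ([] : PySem.Set String)) = [] from by
    simp [PySem.Dict.getD_eq_get?_getD, PySem.Dict.get?_empty]] at hw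
  exact absurd hw (List.not_mem_nil)

theorem pvReachDictB_getD (succ : PySem.Dict String (PySem.Set String))
    (hnd : succ.keys.Nodup) (w : String) (hw : w ∈ succ.keys) :
    (pvReachDictB succ).getD w [] = pvReachFromB succ w := by
  have hitems : (pvReachDictB succ).items
      = PySem.Dict.empty.items
          ++ succ.keys.map (fun x => (x, pvReachFromB succ x)) := by
    unfold pvReachDictB
    exact PySem.Dict.items_foldl_insert_fresh succ.keys (fun x => x)
      (fun x => pvReachFromB succ x) PySem.Dict.empty
      (fun a _ => PySem.Dict.contains_empty a) (by simpa using hnd)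
  have hmem : (w, pvReachFromB succ w) ∈ (pvReachDictB succ).items := by
    rw [hitems]
    refine List.mem_append.mpr (Or.inr ?_)
    exact List.mem_map.mpr ⟨w, hw, rfl⟩
  have hnd' : (pvReachDictB succ).keys.Nodup := by
    unfold pvReachDictB
    exact PySem.Dict.nodup_keys_foldl_insert succ.keys
      (fun _ x => pvReachFromB succ x) PySem.Dict.empty PySem.Dict.nodup_keys_empty
  exact PySem.Dict.getD_of_mem_items _ hmem hnd' []

theorem pvPred_eq (edges : List (String × String)) (u v : String) :
    pvReachableViaOthersA (pvBuildAdjA edges) u v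
      = ((pvBuildAdjA edges).getD u []).any
          (fun w => w != v && ((pvReachDictB (pvBuildAdjA edges)).getD w []).contains v) := by
  obtain ⟨hnd, hval⟩ := pvBuildAdj_inv edges
  set adj := pvBuildAdjA edges with hadj
  have hL : pvReachableViaOthersA adj u v = true ↔
      ∃ w ∈ adj.getD u [], w ≠ v ∧ pvAReach adj [] w v := by
    unfold pvReachableViaOthersA
    rw [pvDfsFindA_correct adj hnd v _ _ [] (Nat.le_succ _)]
    constructor
    · rintro ⟨w, hw, hr⟩
      rcases List.mem_filter.mp hw with ⟨hw1, hw2⟩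
      exact ⟨w, hw1, by simpa using hw2, hr⟩
    · rintro ⟨w, hw, hne, hr⟩
      exact ⟨w, List.mem_filter.mpr ⟨hw, by simpa using hne⟩, hr⟩
  have hR : (adj.getD u []).any
        (fun w => w != v && ((pvReachDictB adj).getD w []).contains v) = true ↔
      ∃ w ∈ adj.getD u [], w ≠ v ∧ pvAReach adj [] w v := by
    rw [List.any_eq_true]
    constructor
    · rintro ⟨w, hw, hp⟩
      rw [Bool.and_eq_true] at hp
      rcases hp with ⟨hp1, hp2⟩
      have hk : w ∈ adj.keys := hval u w hw
      rw [pvReachDictB_getD adj hnd w hk, PySem.Set.contains_iff] at hp2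
      unfold pvReachFromB at hp2
      rw [pvDfsCollectB_correct adj hnd _ [w] [] (by simp) v] at hp2
      rcases hp2 with h | ⟨w', hw', hr⟩
      · simp at h
      · have hww : w' = w := List.mem_singleton.mp hw'
        exact ⟨w, hw, by simpa using hp1, hww ▸ hr⟩
    · rintro ⟨w, hw, hne, hr⟩
      have hk : w ∈ adj.keys := hval u w hw
      refine ⟨w, hw, ?_⟩
      rw [Bool.and_eq_true]
      refine ⟨by simpa using hne, ?_⟩
      rw [pvReachDictB_getD adj hnd w hk, PySem.Set.contains_iff]
      unfold pvReachFromB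
      rw [pvDfsCollectB_correct adj hnd _ [w] [] (by simp) v]
      exact Or.inr ⟨w, List.mem_singleton_self w, hr⟩
  rw [Bool.eq_iff_iff]
  rw [show ((pvReachableViaOthersA adj u v : Bool) : Prop) = (pvReachableViaOthersA adj u v = true) from rfl]
  rw [hL, hR]

theorem pvReduced_eq (edges : List (String × String)) :
    pvTransitiveReductionA edges
      = edges.filter
          (fun e => !((pvBuildSuccB edges).getD e.1 []).any
            (fun w => w != e.2 && ((pvReachDictB (pvBuildSuccB edges)).getD w []).contains e.2)) := by
  have hsucc : pvBuildSuccB edges = pvBuildAdjA edges := rfl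
  unfold pvTransitiveReductionA
  rw [hsucc]
  apply List.filter_congr
  intro e _
  rw [pvPred_eq edges e.1 e.2]

-- ===== VERDICT (by name: the statement is the Claim_ definition above) =====
theorem render_simple_spec : Claim_equal_render_simple := by
  intro nodes edges has_deps _
  unfold Spec_render_simple render_simple render_simple_alt
  rw [pvReduced_eq]
  simp only [PySem.List.foldl_append_singleton_eq_map, pvBuildSuccB,
    List.append_assoc, List.nil_append, List.cons_append]
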